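-- pv_equiv track=rewrite | github.com/bbalouki/bbstrader | bbstrader/strategies/arch.py | execute_trading_strategy
-- ===== SOURCE A (Python) =====
-- def execute_trading_strategy(predictions):
--     """
--     Executes the trading strategy based on a list
--     of predictions, determining positions to take.
--
--     Parameters
--     ==========
--     :param predictions (list): A list of predicted returns.
--
--     Returns
--     =======
--         list: A list of positions (1 for 'LONG', -1 for 'SHORT', 0 for 'HOLD').
--     """
--     positions = []  # Long if 1, Short if -1
--     for i in range(1, len(predictions)):
--         if predictions[i] > 0:
--             positions.append(1)  # Long
--         elif predictions[i] < 0: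
--             positions.append(-1)  # Short
--         else:
--             positions.append(positions[-1])  # Hold previous position
--
--     # Adjust for the initial position based on the first prediction
--     initial_position = 1 if predictions[0] > 0 else -1
--     positions = [initial_position] + positions
--     return positions
-- ===== SOURCE B (Python) =====
-- def execute_trading_strategy(predictions):
--     # Build the raw sign list first (index 0's zero maps to -1 as in the spec),
--     # then forward-fill the zeros (HOLD) in a second pass.
--     signs = [1 if predictions[0] > 0 else -1]
--     signs += [(p > 0) - (p < 0) for p in predictions[1:]]
--     positions = []
--     prev = 0
--     for s in signs:
--         prev = s if s != 0 else prev
--         positions.append(prev)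
--     return positions
-- ===== Notes on version B (the rewrite author's own statement) =====
-- stated objective: alternative
-- what changed: Replaces A's single stateful index loop (append 1/-1 or re-read positions[-1], then prepend the initial position) by a build-then-fill decomposition: first map every prediction to its raw sign, then one forward-fill pass that carries the previous position over zeros.
import Mathlib
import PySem

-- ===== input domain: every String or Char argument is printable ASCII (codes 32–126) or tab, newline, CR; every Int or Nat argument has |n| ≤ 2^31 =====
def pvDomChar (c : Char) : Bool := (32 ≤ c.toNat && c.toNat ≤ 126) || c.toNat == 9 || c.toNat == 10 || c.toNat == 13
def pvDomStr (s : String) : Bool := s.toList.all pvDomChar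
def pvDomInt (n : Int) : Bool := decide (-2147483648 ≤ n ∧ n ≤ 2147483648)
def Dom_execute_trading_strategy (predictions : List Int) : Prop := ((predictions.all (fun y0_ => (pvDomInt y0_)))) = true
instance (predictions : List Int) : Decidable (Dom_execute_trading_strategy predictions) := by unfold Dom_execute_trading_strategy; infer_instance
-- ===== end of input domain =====

-- B replaces A's single stateful index loop by a build-then-fill decomposition
-- (map predictions to raw signs, then forward-fill zeros): an alternative of the same cost.


-- ===== PORT A =====
-- loop body of A: append 1 / -1, or re-read positions[-1] on a zero prediction
-- (the .getD 0 defaults are only reached outside Pre_, where Python raises IndexError)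
def pvStepA (positions : List Int) (p : Int) : List Int :=
  if p > 0 then positions ++ [1]
  else if p < 0 then positions ++ [-1]
  else positions ++ [(PySem.List.pyGet? positions (-1)).getD 0]

def execute_trading_strategy (predictions : List Int) : List Int :=
  let positions :=
    (PySem.List.pyRange 1 (predictions.length : Int) 1).foldl
      (fun positions i => pvStepA positions (PySem.List.pyGetD predictions i 0)) []
  let initial_position : Int := if (PySem.List.pyGet? predictions 0).getD 0 > 0 then 1 else -1
  initial_position :: positions

-- ===== PORT B =====
-- B's sign map: (p > 0) - (p < 0)
def pvSign (p : Int) : Int := (if p > 0 then (1 : Int) else 0) - (if p < 0 then 1 else 0)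

-- forward-fill step of B: carry prev over zeros
def pvStepB (st : List Int × Int) (s : Int) : List Int × Int :=
  let prev := if s ≠ 0 then s else st.2
  (st.1 ++ [prev], prev)

def execute_trading_strategy_alt (predictions : List Int) : List Int :=
  let signs : List Int :=
    (if (PySem.List.pyGet? predictions 0).getD 0 > 0 then (1 : Int) else -1)
      :: (PySem.List.slice predictions (some 1) none).map pvSign
  (signs.foldl pvStepB ([], 0)).1

-- ===== PRECONDITION & SPEC =====
-- Pre_ excludes exactly the inputs where A raises IndexError: the empty list
-- (predictions[0]) and lists whose second element is 0 (positions[-1] on an empty list).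
def Pre_execute_trading_strategy (predictions : List Int) : Prop :=
  predictions ≠ [] ∧ predictions.getD 1 1 ≠ 0
instance (predictions : List Int) : Decidable (Pre_execute_trading_strategy predictions) := by
  unfold Pre_execute_trading_strategy; infer_instance

def pvWitness_execute_trading_strategy : List Int := [5, 2, 0, -1, 0]

def Spec_execute_trading_strategy (predictions : List Int) (out : List Int) : Prop :=
  out = execute_trading_strategy_alt predictions
instance (predictions : List Int) (out : List Int) : Decidable (Spec_execute_trading_strategy predictions out) := by
  unfold Spec_execute_trading_strategy; infer_instance

-- ===== CLAIM (what is proved, stated in full; the proofs are below) =====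
def Claim_equal_execute_trading_strategy : Prop :=
  ∀ (predictions : List Int), Dom_execute_trading_strategy predictions →
    Pre_execute_trading_strategy predictions →
    Spec_execute_trading_strategy predictions (execute_trading_strategy predictions)

-- ===== LEMMAS AND PROOFS =====

-- Core invariant: A's append loop over l starting from a nonempty accumulator whose
-- last element is v equals B's forward-fill fold over the mapped signs with prev = v,
-- up to the prefix B already holds.
lemma pv_loop_eq (l : List Int) : ∀ (acc pre : List Int) (v : Int),
    (PySem.List.pyGet? acc (-1)).getD 0 = v →
    ((l.map pvSign).foldl pvStepB (pre ++ acc, v)).1 = pre ++ l.foldl pvStepA acc := by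
  induction l with
  | nil => intro acc pre v _; simp
  | cons p l ih =>
    intro acc pre v hv
    rcases lt_trichotomy p 0 with hp | hp | hp
    · have : pvStepB (pre ++ acc, v) (pvSign p) = (pre ++ (acc ++ [-1]), -1) := by
        simp [pvStepB, pvSign, hp, not_lt.mpr hp.le]
      simp only [List.map_cons, List.foldl_cons, this]
      rw [ih (acc ++ [-1]) pre (-1) (by simp [PySem.List.pyGet?_neg_one_append_singleton])]
      simp [pvStepA, hp, not_lt.mpr hp.le]
    · subst hp
      have : pvStepB (pre ++ acc, v) (pvSign 0) = (pre ++ (acc ++ [v]), v) := by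
        simp [pvStepB, pvSign]
      simp only [List.map_cons, List.foldl_cons, this]
      rw [ih (acc ++ [v]) pre v (by simp [PySem.List.pyGet?_neg_one_append_singleton])]
      simp [pvStepA, hv]
    · have : pvStepB (pre ++ acc, v) (pvSign p) = (pre ++ (acc ++ [1]), 1) := by
        simp [pvStepB, pvSign, hp, not_lt.mpr hp.le]
      simp only [List.map_cons, List.foldl_cons, this]
      rw [ih (acc ++ [1]) pre 1 (by simp [PySem.List.pyGet?_neg_one_append_singleton])]
      simp [pvStepA, hp]

-- ===== VERDICT (by name: the statement is the Claim_ definition above) =====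
theorem execute_trading_strategy_spec : Claim_equal_execute_trading_strategy := by
  intro predictions _ hpre
  obtain ⟨hne, h1⟩ := hpre
  unfold Spec_execute_trading_strategy execute_trading_strategy execute_trading_strategy_alt
  match predictions, hne with
  | [p0], _ =>
      simp only [PySem.List.slice_from_one]
      rcases lt_trichotomy p0 0 with hp | hp | hp
      · simp [pvStepB, PySem.List.pyRange_one_eq_nil, not_lt.mpr hp.le]
      · subst hp; simp [pvStepB, PySem.List.pyRange_one_eq_nil]
      · simp [pvStepB, PySem.List.pyRange_one_eq_nil, hp]
  | p0 :: p1 :: rest, _ =>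
      have hp1 : p1 ≠ 0 := by simpa using h1
      simp only [PySem.List.slice_from_one]
      set s0 : Int := if (PySem.List.pyGet? (p0 :: p1 :: rest) 0).getD 0 > 0 then 1 else -1 with hs0
      -- A's index loop is the fold of pvStepA over the tail
      rw [show ((p0 :: p1 :: rest).length : Int) = PySem.List.len (p0 :: p1 :: rest) from by
            simp [PySem.List.len]]
      rw [PySem.List.foldl_pyRange_pyGetD (p0 :: p1 :: rest) 0 pvStepA [] (a := 1) (by norm_num)]
      simp only [List.tail_cons, Int.toNat_one, List.drop_one]
      -- peel the first two steps of B's fold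
      have hs0ne : s0 ≠ 0 := by rcases ite_eq_or_eq ((PySem.List.pyGet? (p0 :: p1 :: rest) 0).getD 0 > 0) (1:Int) (-1) with h | h <;> rw [hs0, h] <;> decide
      have c1def : pvSign p1 ≠ 0 := by
        unfold pvSign; rcases lt_trichotomy p1 0 with h | h | h
        · simp [h, not_lt.mpr h.le]
        · exact absurd h hp1
        · simp [h, not_lt.mpr h.le]
      have step0 : pvStepB ([], 0) s0 = ([s0], s0) := by simp [pvStepB, hs0ne]
      have step1 : pvStepB ([s0], s0) (pvSign p1) = ([s0] ++ [pvSign p1], pvSign p1) := by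
        simp [pvStepB, c1def]
      simp only [List.map_cons, List.foldl_cons, step0, step1]
      -- A's first loop step
      have stepA1 : pvStepA [] p1 = [pvSign p1] := by
        unfold pvStepA pvSign; rcases lt_trichotomy p1 0 with h | h | h
        · simp [h, not_lt.mpr h.le]
        · exact absurd h hp1
        · simp [h, not_lt.mpr h.le]
      rw [pv_loop_eq rest [pvSign p1] [s0] (pvSign p1)
            (by simp [PySem.List.pyGet?_neg_one])]
      rw [stepA1, List.singleton_append]
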